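-- pv_equiv track=rewrite | github.com/elifabh/aura-spatial-companion | backend/core/vision.py | build_zone_prompt
-- ===== SOURCE A (Python) =====
-- def build_zone_prompt(profile_text: str, groups: list) -> str:
--     """Build an archetype-personalised prompt for spatial zone detection."""
--     focus_parts = []
--     if any(g in groups for g in ["child_baby", "child_toddler", "child"]):
--         focus_parts.append("child safety (sharp corners, choking hazards, fall zones, exposed outlets)")
--     if "elderly" in groups:
--         focus_parts.append("fall prevention, clear pathways, furniture stability, night lighting")
--     if "disability_motor" in groups:
--         focus_parts.append("wheelchair clearance (min 90 cm), reach zones, stable surfaces")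
--     if "disability_visual" in groups:
--         focus_parts.append("contrast zones, glare sources, texture differentiation areas")
--     if "disability_hearing" in groups:
--         focus_parts.append("visual alert zones, sightline clearance, reflective surfaces")
--     if "remote_worker" in groups or "student" in groups:
--         focus_parts.append("ergonomic work setup, screen glare, cable hazards")
--     if "wellness" in groups or "fitness" in groups:
--         focus_parts.append("movement space, ventilation quality, floor clearance")
--     if not focus_parts:
--         focus_parts.append("general safety, lighting quality, air circulation, comfort")
--
--     focus_text = "\n".join(f"- {f}" for f in focus_parts)
--
--     return f"""Analyse this image of a living space and identify 3 to 6 distinct spatial zones.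
--
-- USER PROFILE:
-- {profile_text}
--
-- PRIORITY FOCUS AREAS FOR THIS PROFILE:
-- {focus_text}
--
-- Return a JSON object with EXACTLY this structure:
-- {{
--   "zones": [
--     {{
--       "id": "zone_1",
--       "label": "Short label (max 4 words)",
--       "type": "danger",
--       "color": "red",
--       "description": "What you observe in this zone (1-2 sentences).",
--       "recommendation": "One specific actionable improvement requiring no purchases.",
--       "priority": 1,
--       "x_percent": 10,
--       "y_percent": 20,
--       "width_percent": 30,
--       "height_percent": 25
--     }}
--   ],
--   "overall_score": 68,
--   "summary": "Single sentence overall assessment tailored to this user."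
-- }}
--
-- ZONE TYPES (use exactly these values):
-- - "danger"      color: "red"    — Immediate safety risk
-- - "caution"     color: "yellow" — Potential risk to monitor
-- - "opportunity" color: "green"  — Existing positive feature to highlight
-- - "suggestion"  color: "blue"   — Free improvement possible
--
-- COORDINATE RULES:
-- - x_percent, y_percent: top-left corner of zone (0-100 % of image width/height)
-- - width_percent, height_percent: zone dimensions (5-40 % each)
-- - Distribute zones across different areas of the image; avoid total overlap
-- - priority: 1 = most urgent; ascending integers
-- - overall_score: 0-100 rating for this user's specific needs
--
-- CRITICAL PLACEMENT RULES — violations will be rejected: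
-- - "opportunity" (green) zones MUST cover empty or open areas: clear floor, open wall, empty shelf, window light. NEVER place them on a TV screen, sofa, occupied chair, bed, table surface, or any filled furniture.
-- - Zones whose label contains "floor", "open", "space", or "area" MUST have y_percent >= 45. The floor is always in the lower half of the image. If you place a floor zone near the top of the image, it will be rejected.
-- - Do not place any single zone entirely on top of one piece of furniture.
-- """
-- ===== SOURCE B (Python) =====
-- # B: one pass over groups with an inverted trigger->rule index and a flag list,
-- # instead of A's seven separate membership scans of groups.
-- _TRIGGER_INDEX = {
--     "child_baby": 0, "child_toddler": 0, "child": 0,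
--     "elderly": 1,
--     "disability_motor": 2,
--     "disability_visual": 3,
--     "disability_hearing": 4,
--     "remote_worker": 5, "student": 5,
--     "wellness": 6, "fitness": 6,
-- }
--
-- _TEXTS = [
--     "child safety (sharp corners, choking hazards, fall zones, exposed outlets)",
--     "fall prevention, clear pathways, furniture stability, night lighting",
--     "wheelchair clearance (min 90 cm), reach zones, stable surfaces",
--     "contrast zones, glare sources, texture differentiation areas",
--     "visual alert zones, sightline clearance, reflective surfaces",
--     "ergonomic work setup, screen glare, cable hazards",
--     "movement space, ventilation quality, floor clearance",
-- ]
--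
-- def build_zone_prompt(profile_text: str, groups: list) -> str:
--     fired = [False] * 7
--     for g in groups:
--         i = _TRIGGER_INDEX.get(g)
--         if i is not None:
--             fired[i] = True
--
--     focus_parts = [t for flag, t in zip(fired, _TEXTS) if flag]
--     if not focus_parts:
--         focus_parts = ["general safety, lighting quality, air circulation, comfort"]
--
--     focus_text = "\n".join(f"- {f}" for f in focus_parts)
--
--     return f"""Analyse this image of a living space and identify 3 to 6 distinct spatial zones.
--
-- USER PROFILE:
-- {profile_text}
--
-- PRIORITY FOCUS AREAS FOR THIS PROFILE:
-- {focus_text}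
--
-- Return a JSON object with EXACTLY this structure:
-- {{
--   "zones": [
--     {{
--       "id": "zone_1",
--       "label": "Short label (max 4 words)",
--       "type": "danger",
--       "color": "red",
--       "description": "What you observe in this zone (1-2 sentences).",
--       "recommendation": "One specific actionable improvement requiring no purchases.",
--       "priority": 1,
--       "x_percent": 10,
--       "y_percent": 20,
--       "width_percent": 30,
--       "height_percent": 25
--     }}
--   ],
--   "overall_score": 68,
--   "summary": "Single sentence overall assessment tailored to this user."
-- }}
--
-- ZONE TYPES (use exactly these values):
-- - "danger"      color: "red"    — Immediate safety risk
-- - "caution"     color: "yellow" — Potential risk to monitor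
-- - "opportunity" color: "green"  — Existing positive feature to highlight
-- - "suggestion"  color: "blue"   — Free improvement possible
--
-- COORDINATE RULES:
-- - x_percent, y_percent: top-left corner of zone (0-100 % of image width/height)
-- - width_percent, height_percent: zone dimensions (5-40 % each)
-- - Distribute zones across different areas of the image; avoid total overlap
-- - priority: 1 = most urgent; ascending integers
-- - overall_score: 0-100 rating for this user's specific needs
--
-- CRITICAL PLACEMENT RULES — violations will be rejected:
-- - "opportunity" (green) zones MUST cover empty or open areas: clear floor, open wall, empty shelf, window light. NEVER place them on a TV screen, sofa, occupied chair, bed, table surface, or any filled furniture.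
-- - Zones whose label contains "floor", "open", "space", or "area" MUST have y_percent >= 45. The floor is always in the lower half of the image. If you place a floor zone near the top of the image, it will be rejected.
-- - Do not place any single zone entirely on top of one piece of furniture.
-- """
-- ===== Notes on version B (the rewrite author's own statement) =====
-- stated objective: alternative
-- what changed: Instead of A's seven independent membership scans of groups (one per if-branch), B makes a single pass over groups using an inverted trigger-to-rule-index dictionary to set a 7-entry flag list, then emits the focus texts for the set flags; fallback and final prompt string unchanged.
import Mathlib
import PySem

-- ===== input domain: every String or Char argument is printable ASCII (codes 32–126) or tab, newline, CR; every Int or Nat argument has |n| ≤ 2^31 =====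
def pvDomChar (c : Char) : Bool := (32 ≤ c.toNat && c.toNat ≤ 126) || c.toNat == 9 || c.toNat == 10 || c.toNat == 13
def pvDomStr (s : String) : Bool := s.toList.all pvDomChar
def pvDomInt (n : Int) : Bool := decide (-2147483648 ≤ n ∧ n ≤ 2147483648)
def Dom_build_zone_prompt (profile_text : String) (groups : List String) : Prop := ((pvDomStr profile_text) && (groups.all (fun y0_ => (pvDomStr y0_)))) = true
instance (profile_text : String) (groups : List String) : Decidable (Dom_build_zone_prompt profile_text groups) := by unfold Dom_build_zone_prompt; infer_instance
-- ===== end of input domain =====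

-- B replaces A's seven independent membership scans of groups by a single pass over groups with an inverted trigger->index dictionary and a flag list (objective: alternative); return value only, no side effects.

-- shared prompt literals (the exact f-string text of both Pythons)
def pvPre : String := "Analyse this image of a living space and identify 3 to 6 distinct spatial zones.\n\nUSER PROFILE:\n"
def pvMid : String := "\n\nPRIORITY FOCUS AREAS FOR THIS PROFILE:\n"
def pvSuf : String := "\n\nReturn a JSON object with EXACTLY this structure:\n{\n  \"zones\": [\n    {\n      \"id\": \"zone_1\",\n      \"label\": \"Short label (max 4 words)\",\n      \"type\": \"danger\",\n      \"color\": \"red\",\n      \"description\": \"What you observe in this zone (1-2 sentences).\",\n      \"recommendation\": \"One specific actionable improvement requiring no purchases.\",\n      \"priority\": 1,\n      \"x_percent\": 10,\n      \"y_percent\": 20,\n      \"width_percent\": 30,\n      \"height_percent\": 25\n    }\n  ],\n  \"overall_score\": 68,\n  \"summary\": \"Single sentence overall assessment tailored to this user.\"\n}\n\nZONE TYPES (use exactly these values):\n- \"danger\"      color: \"red\"    — Immediate safety risk\n- \"caution\"     color: \"yellow\" — Potential risk to monitor\n- \"opportunity\" color: \"green\"  — Existing positive feature to highlight\n- \"suggestion\"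  color: \"blue\"   — Free improvement possible\n\nCOORDINATE RULES:\n- x_percent, y_percent: top-left corner of zone (0-100 % of image width/height)\n- width_percent, height_percent: zone dimensions (5-40 % each)\n- Distribute zones across different areas of the image; avoid total overlap\n- priority: 1 = most urgent; ascending integers\n- overall_score: 0-100 rating for this user's specific needs\n\nCRITICAL PLACEMENT RULES — violations will be rejected:\n- \"opportunity\" (green) zones MUST cover empty or open areas: clear floor, open wall, empty shelf, window light. NEVER place them on a TV screen, sofa, occupied chair, bed, table surface, or any filled furniture.\n- Zones whose label contains \"floor\", \"open\", \"space\", or \"area\" MUST have y_percent >= 45. The floor is always in the lower half of the image. If you place a floor zone near the top of the image, it will be rejected.\n- Do not place any single zone entirely on top of one piece of furniture.\n"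
def pvT1 : String := "child safety (sharp corners, choking hazards, fall zones, exposed outlets)"
def pvT2 : String := "fall prevention, clear pathways, furniture stability, night lighting"
def pvT3 : String := "wheelchair clearance (min 90 cm), reach zones, stable surfaces"
def pvT4 : String := "contrast zones, glare sources, texture differentiation areas"
def pvT5 : String := "visual alert zones, sightline clearance, reflective surfaces"
def pvT6 : String := "ergonomic work setup, screen glare, cable hazards"
def pvT7 : String := "movement space, ventilation quality, floor clearance"
def pvFallback : String := "general safety, lighting quality, air circulation, comfort"

-- ===== PORT A =====
-- literal transliteration of A: seven if-branches appending to focus_parts, the empty fallback, then the f-string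
def build_zone_prompt (profile_text : String) (groups : List String) : String :=
  let fp : List String := []
  let fp := if ["child_baby", "child_toddler", "child"].any (fun g => groups.contains g) then fp ++ [pvT1] else fp
  let fp := if groups.contains "elderly" then fp ++ [pvT2] else fp
  let fp := if groups.contains "disability_motor" then fp ++ [pvT3] else fp
  let fp := if groups.contains "disability_visual" then fp ++ [pvT4] else fp
  let fp := if groups.contains "disability_hearing" then fp ++ [pvT5] else fp
  let fp := if groups.contains "remote_worker" || groups.contains "student" then fp ++ [pvT6] else fp
  let fp := if groups.contains "wellness" || groups.contains "fitness" then fp ++ [pvT7] else fp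
  let fp := if fp.isEmpty then fp ++ [pvFallback] else fp
  let focus_text := String.intercalate "\n" (fp.map (fun f => "- " ++ f))
  pvPre ++ profile_text ++ pvMid ++ focus_text ++ pvSuf

-- ===== PORT B =====
-- B's inverted index: trigger group name -> rule index (a Python dict)
def pvTrigIdx : PySem.Dict String Int :=
  PySem.Dict.ofList
    [("child_baby", 0), ("child_toddler", 0), ("child", 0),
     ("elderly", 1),
     ("disability_motor", 2),
     ("disability_visual", 3),
     ("disability_hearing", 4),
     ("remote_worker", 5), ("student", 5),
     ("wellness", 6), ("fitness", 6)]

def pvTexts : List String := [pvT1, pvT2, pvT3, pvT4, pvT5, pvT6, pvT7]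

-- one loop-body step of B: look g up in the dict, set the flag if found
def pvStep (fired : List Bool) (g : String) : List Bool :=
  match pvTrigIdx.get? g with
  | some i => PySem.List.pySetD fired i true   -- index from the dict is 0..6, always in range
  | none => fired

-- literal transliteration of B: one pass over groups setting flags, then zip/filter, fallback, same f-string
def build_zone_prompt_alt (profile_text : String) (groups : List String) : String :=
  let fired := groups.foldl pvStep [false, false, false, false, false, false, false]
  let focus_parts := ((fired.zip pvTexts).filter (fun p => p.1)).map (fun p => p.2)
  let focus_parts := if focus_parts.isEmpty then [pvFallback] else focus_parts
  let focus_text := String.intercalate "\n" (focus_parts.map (fun f => "- " ++ f))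
  pvPre ++ profile_text ++ pvMid ++ focus_text ++ pvSuf

-- ===== PRECONDITION & SPEC =====
def Spec_build_zone_prompt (profile_text : String) (groups : List String) (out : String) : Prop := out = build_zone_prompt_alt profile_text groups
instance (profile_text : String) (groups : List String) (out : String) : Decidable (Spec_build_zone_prompt profile_text groups out) := by unfold Spec_build_zone_prompt; infer_instance

-- ===== CLAIM =====
def Claim_equal_build_zone_prompt : Prop := ∀ (profile_text : String) (groups : List String), Dom_build_zone_prompt profile_text groups → Spec_build_zone_prompt profile_text groups (build_zone_prompt profile_text groups)

-- ===== LEMMAS AND PROOFS =====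

-- per-rule trigger predicates (proof bookkeeping only)
def pvE0 (g : String) : Bool := g == "child_baby" || g == "child_toddler" || g == "child"
def pvE1 (g : String) : Bool := g == "elderly"
def pvE2 (g : String) : Bool := g == "disability_motor"
def pvE3 (g : String) : Bool := g == "disability_visual"
def pvE4 (g : String) : Bool := g == "disability_hearing"
def pvE5 (g : String) : Bool := g == "remote_worker" || g == "student"
def pvE6 (g : String) : Bool := g == "wellness" || g == "fitness"

theorem pvTrigIdx_mk : pvTrigIdx = PySem.Dict.mk
    [("child_baby", 0), ("child_toddler", 0), ("child", 0),
     ("elderly", 1), ("disability_motor", 2), ("disability_visual", 3),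
     ("disability_hearing", 4), ("remote_worker", 5), ("student", 5),
     ("wellness", 6), ("fitness", 6)] := by rfl

theorem pvStep_eq (a0 a1 a2 a3 a4 a5 a6 : Bool) (g : String) :
    pvStep [a0, a1, a2, a3, a4, a5, a6] g =
      [a0 || pvE0 g, a1 || pvE1 g, a2 || pvE2 g, a3 || pvE3 g,
       a4 || pvE4 g, a5 || pvE5 g, a6 || pvE6 g] := by
  unfold pvStep
  rw [pvTrigIdx_mk]
  by_cases h0 : g = "child_baby"
  · subst h0; simp [PySem.Dict.get?_mk_cons, PySem.List.pySetD, PySem.List.pySet?, PySem.List.pyIdx?, pvE0, pvE1, pvE2, pvE3, pvE4, pvE5, pvE6]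
  by_cases h1 : g = "child_toddler"
  · subst h1; simp [PySem.Dict.get?_mk_cons, PySem.List.pySetD, PySem.List.pySet?, PySem.List.pyIdx?, pvE0, pvE1, pvE2, pvE3, pvE4, pvE5, pvE6]
  by_cases h2 : g = "child"
  · subst h2; simp [PySem.Dict.get?_mk_cons, PySem.List.pySetD, PySem.List.pySet?, PySem.List.pyIdx?, pvE0, pvE1, pvE2, pvE3, pvE4, pvE5, pvE6]
  by_cases h3 : g = "elderly"
  · subst h3; simp [PySem.Dict.get?_mk_cons, PySem.List.pySetD, PySem.List.pySet?, PySem.List.pyIdx?, pvE0, pvE1, pvE2, pvE3, pvE4, pvE5, pvE6]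
  by_cases h4 : g = "disability_motor"
  · subst h4; simp [PySem.Dict.get?_mk_cons, PySem.List.pySetD, PySem.List.pySet?, PySem.List.pyIdx?, pvE0, pvE1, pvE2, pvE3, pvE4, pvE5, pvE6]
  by_cases h5 : g = "disability_visual"
  · subst h5; simp [PySem.Dict.get?_mk_cons, PySem.List.pySetD, PySem.List.pySet?, PySem.List.pyIdx?, pvE0, pvE1, pvE2, pvE3, pvE4, pvE5, pvE6]
  by_cases h6 : g = "disability_hearing"
  · subst h6; simp [PySem.Dict.get?_mk_cons, PySem.List.pySetD, PySem.List.pySet?, PySem.List.pyIdx?, pvE0, pvE1, pvE2, pvE3, pvE4, pvE5, pvE6]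
  by_cases h7 : g = "remote_worker"
  · subst h7; simp [PySem.Dict.get?_mk_cons, PySem.List.pySetD, PySem.List.pySet?, PySem.List.pyIdx?, pvE0, pvE1, pvE2, pvE3, pvE4, pvE5, pvE6]
  by_cases h8 : g = "student"
  · subst h8; simp [PySem.Dict.get?_mk_cons, PySem.List.pySetD, PySem.List.pySet?, PySem.List.pyIdx?, pvE0, pvE1, pvE2, pvE3, pvE4, pvE5, pvE6]
  by_cases h9 : g = "wellness"
  · subst h9; simp [PySem.Dict.get?_mk_cons, PySem.List.pySetD, PySem.List.pySet?, PySem.List.pyIdx?, pvE0, pvE1, pvE2, pvE3, pvE4, pvE5, pvE6]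
  by_cases h10 : g = "fitness"
  · subst h10; simp [PySem.Dict.get?_mk_cons, PySem.List.pySetD, PySem.List.pySet?, PySem.List.pyIdx?, pvE0, pvE1, pvE2, pvE3, pvE4, pvE5, pvE6]
  simp [PySem.Dict.get?, beq_iff_eq, h0, h1, h2, h3, h4, h5, h6, h7, h8, h9, h10, Ne.symm h0, Ne.symm h1, Ne.symm h2, Ne.symm h3, Ne.symm h4, Ne.symm h5, Ne.symm h6, Ne.symm h7, Ne.symm h8, Ne.symm h9, Ne.symm h10, pvE0, pvE1, pvE2, pvE3, pvE4, pvE5, pvE6]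

theorem pvFold_eq (groups : List String) :
    ∀ (a0 a1 a2 a3 a4 a5 a6 : Bool),
      groups.foldl pvStep [a0, a1, a2, a3, a4, a5, a6] =
        [a0 || groups.any pvE0, a1 || groups.any pvE1, a2 || groups.any pvE2,
         a3 || groups.any pvE3, a4 || groups.any pvE4, a5 || groups.any pvE5,
         a6 || groups.any pvE6] := by
  induction groups with
  | nil => simp
  | cons g gs ih =>
      intro a0 a1 a2 a3 a4 a5 a6
      simp [List.foldl_cons, pvStep_eq, ih, Bool.or_assoc]

theorem pvAnyE0 (groups : List String) : groups.any pvE0 = (groups.contains "child_baby" || (groups.contains "child_toddler" || groups.contains "child")) := by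
  rw [Bool.eq_iff_iff]; simp [pvE0, List.any_eq_true]; aesop
theorem pvAnyE1 (groups : List String) : groups.any pvE1 = groups.contains "elderly" := by
  rw [Bool.eq_iff_iff]; simp [pvE1, List.any_eq_true]
theorem pvAnyE2 (groups : List String) : groups.any pvE2 = groups.contains "disability_motor" := by
  rw [Bool.eq_iff_iff]; simp [pvE2, List.any_eq_true]
theorem pvAnyE3 (groups : List String) : groups.any pvE3 = groups.contains "disability_visual" := by
  rw [Bool.eq_iff_iff]; simp [pvE3, List.any_eq_true]
theorem pvAnyE4 (groups : List String) : groups.any pvE4 = groups.contains "disability_hearing" := by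
  rw [Bool.eq_iff_iff]; simp [pvE4, List.any_eq_true]
theorem pvAnyE5 (groups : List String) : groups.any pvE5 = (groups.contains "remote_worker" || groups.contains "student") := by
  rw [Bool.eq_iff_iff]; simp [pvE5, List.any_eq_true]; aesop
theorem pvAnyE6 (groups : List String) : groups.any pvE6 = (groups.contains "wellness" || groups.contains "fitness") := by
  rw [Bool.eq_iff_iff]; simp [pvE6, List.any_eq_true]; aesop

-- ===== VERDICT =====
theorem build_zone_prompt_spec : Claim_equal_build_zone_prompt := by
  intro profile_text groups _
  unfold Spec_build_zone_prompt build_zone_prompt build_zone_prompt_alt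
  rw [pvFold_eq, pvAnyE0, pvAnyE1, pvAnyE2, pvAnyE3, pvAnyE4, pvAnyE5, pvAnyE6]
  simp only [List.any_cons, List.any_nil, Bool.or_false, Bool.false_or]
  generalize (groups.contains "child_baby" || (groups.contains "child_toddler" || groups.contains "child")) = b1
  generalize groups.contains "elderly" = b2
  generalize groups.contains "disability_motor" = b3
  generalize groups.contains "disability_visual" = b4
  generalize groups.contains "disability_hearing" = b5
  generalize (groups.contains "remote_worker" || groups.contains "student") = b6
  generalize (groups.contains "wellness" || groups.contains "fitness") = b7
  cases b1 <;> cases b2 <;> cases b3 <;> cases b4 <;> cases b5 <;> cases b6 <;> cases b7 <;> rfl
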